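-- pv_equiv track=rewrite | github.com/divyasree48/GeeksForGeeks | Easy/Panagram Checking/panagram-checking.py | checkPangram
-- ===== SOURCE A (Python) =====
-- def checkPangram(s):
--     #code here
--     c=0
--     for i in s:
--
--         if ord(i)>=65 and ord(i)<=90:
--             x=ord(i)-64
--             c=c|(1<<x)
--         if ord(i)>=97 and ord(i)<=122:
--             x=ord(i)-96
--
--             c=c|(1<<x)
--
--     if bin(c)[2::].count('1')==26:
--         return 1
--     return 0
-- ===== SOURCE B (Python) =====
-- def checkPangram(s):
--     low = s.lower()
--     return 1 if all(ch in low for ch in 'abcdefghijklmnopqrstuvwxyz') else 0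
-- ===== Notes on version B (the rewrite author's own statement) =====
-- stated objective: faster
-- what changed: Replaces the per-character Python loop that accumulates a bitmask and then counts set bits of its binary string with an alphabet-driven check: lowercase the string once and test each of the 26 letters for membership via built-in substring search.
import Mathlib
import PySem

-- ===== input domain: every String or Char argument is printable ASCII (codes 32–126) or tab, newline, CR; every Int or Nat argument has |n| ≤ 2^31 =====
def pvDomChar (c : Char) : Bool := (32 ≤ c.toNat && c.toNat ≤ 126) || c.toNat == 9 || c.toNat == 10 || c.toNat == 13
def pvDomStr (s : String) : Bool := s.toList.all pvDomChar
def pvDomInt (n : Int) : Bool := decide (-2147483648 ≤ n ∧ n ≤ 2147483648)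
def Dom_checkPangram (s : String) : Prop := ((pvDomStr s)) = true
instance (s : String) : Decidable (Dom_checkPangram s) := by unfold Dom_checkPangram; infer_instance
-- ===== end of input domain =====

-- B replaces A's bitmask-accumulating scan (plus counting the set bits of bin(c)) by lowercasing once
-- and testing each of the 26 letters for membership — a simpler, alphabet-driven decomposition.


-- ===== PORT A =====
-- ord(i) is ported as (i.toNat : Int) — exact (ord = code point); 1 << x as (1:Int) <<< x.toNat (x ≥ 0 in both branches)
def chkStep (c : Int) (i : Char) : Int :=
  let o : Int := (i.toNat : Int)
  let c1 := if 65 ≤ o ∧ o ≤ 90 then PySem.Int.bor c ((1 : Int) <<< (o - 64).toNat) else c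
  if 97 ≤ o ∧ o ≤ 122 then PySem.Int.bor c1 ((1 : Int) <<< (o - 96).toNat) else c1

def checkPangram (s : String) : Int :=
  let c := s.toList.foldl chkStep 0
  if PySem.Str.count (PySem.Str.slice (PySem.Int.pyBin c) (some 2) none) "1" = 26 then 1 else 0

-- ===== PORT B =====
-- 'ch in low' (single-character substring test) is PySem.Str.isIn
def checkPangram_alt (s : String) : Int :=
  let low := PySem.Str.lower s
  if ("abcdefghijklmnopqrstuvwxyz".toList.all (fun ch => PySem.Str.isIn (String.ofList [ch]) low)) then 1 else 0

-- ===== PRECONDITION & SPEC =====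
def Spec_checkPangram (s : String) (out : Int) : Prop := out = checkPangram_alt s
instance (s : String) (out : Int) : Decidable (Spec_checkPangram s out) := by unfold Spec_checkPangram; infer_instance

-- ===== CLAIM (what is proved, stated in full; the proofs are below) =====
def Claim_equal_checkPangram : Prop := ∀ (s : String), Dom_checkPangram s → Spec_checkPangram s (checkPangram s)

-- ===== LEMMAS AND PROOFS =====

-- Nat-side mirror of A's loop step
def stepN (c : Nat) (i : Char) : Nat :=
  let o := i.toNat
  let c1 := if 65 ≤ o ∧ o ≤ 90 then c ||| (1 <<< (o - 64)) else c
  if 97 ≤ o ∧ o ≤ 122 then c1 ||| (1 <<< (o - 96)) else c1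

-- number of 1-bits, by halving
def onesN : Nat → Nat
  | 0 => 0
  | n+1 => (n+1) % 2 + onesN ((n+1)/2)

theorem chkStep_cast (a : Nat) (i : Char) : chkStep (a : Int) i = ((stepN a i : Nat) : Int) := by
  simp only [chkStep, stepN]
  have h1 : ((i.toNat : Int) - 64).toNat = i.toNat - 64 := by omega
  have h2 : ((i.toNat : Int) - 96).toNat = i.toNat - 96 := by omega
  have e1 : ((65:Int) ≤ (i.toNat:Int) ∧ (i.toNat:Int) ≤ 90) ↔ (65 ≤ i.toNat ∧ i.toNat ≤ 90) := by omega
  have e2 : ((97:Int) ≤ (i.toNat:Int) ∧ (i.toNat:Int) ≤ 122) ↔ (97 ≤ i.toNat ∧ i.toNat ≤ 122) := by omega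
  have hs : ∀ k : Nat, (1:Int) <<< k = ((1 <<< k : Nat) : Int) := by
    intro k; simp [Int.natCast_shiftLeft]
  rw [h1, h2]
  simp only [e1, e2]
  split_ifs <;> simp only [hs, PySem.Int.bor_natCast]

theorem foldl_cast (l : List Char) (a : Nat) :
    l.foldl chkStep (a : Int) = ((l.foldl stepN a : Nat) : Int) := by
  induction l generalizing a with
  | nil => rfl
  | cons x xs ih => simp only [List.foldl, chkStep_cast, ih]

-- one letter's contribution to bit k
def hitB (i : Char) (k : Nat) : Bool :=
  (decide (65 ≤ i.toNat) && decide (i.toNat ≤ 90) && (i.toNat - 64 == k)) ||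
  (decide (97 ≤ i.toNat) && decide (i.toNat ≤ 122) && (i.toNat - 96 == k))

theorem testBit_stepN (c : Nat) (i : Char) (k : Nat) :
    (stepN c i).testBit k = (c.testBit k || hitB i k) := by
  simp only [stepN, hitB]
  split_ifs with hA hB hB <;>
    simp_all [Nat.testBit_or, Nat.one_shiftLeft, Nat.testBit_two_pow] <;>
    cases h : (decide (i.toNat - 64 = k)) <;> cases h2 : (decide (i.toNat - 96 = k)) <;>
    simp_all <;> omega

theorem testBit_foldl (l : List Char) (a : Nat) (k : Nat) :
    (l.foldl stepN a).testBit k = (a.testBit k || l.any (fun i => hitB i k)) := by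
  induction l generalizing a with
  | nil => simp
  | cons x xs ih => simp [List.foldl, ih, testBit_stepN, Bool.or_assoc]

theorem foldl_hi (l : List Char) (k : Nat) (hk : 27 ≤ k) :
    (l.foldl stepN 0).testBit k = false := by
  rw [testBit_foldl]
  simp only [Nat.zero_testBit, Bool.false_or, List.any_eq_false]
  intro i _
  simp only [hitB]
  simp
  omega

theorem foldl_lt (l : List Char) : l.foldl stepN 0 < 2 ^ 27 :=
  Nat.lt_pow_two_of_testBit _ (fun i hi => foldl_hi l i hi)

theorem foldl_bit0 (l : List Char) : (l.foldl stepN 0).testBit 0 = false := by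
  rw [testBit_foldl]
  simp only [Nat.zero_testBit, Bool.false_or, List.any_eq_false]
  intro i _
  simp only [hitB]
  simp
  omega

theorem onesN_halve (n : Nat) (h : 0 < n) : onesN n = n % 2 + onesN (n / 2) := by
  cases n with
  | zero => omega
  | succ m => simp [onesN]

theorem onesN_le (m : Nat) : ∀ n, n < 2 ^ m → onesN n ≤ m ∧ (onesN n = m → n = 2 ^ m - 1) := by
  induction m with
  | zero =>
    intro n hn
    interval_cases n
    simp [onesN]
  | succ m ih =>
    intro n hn
    rcases Nat.eq_zero_or_pos n with h0 | h0
    · subst h0; simp [onesN]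
    · rw [onesN_halve n h0]
      have hh : n / 2 < 2 ^ m := by omega
      obtain ⟨hle, heq⟩ := ih (n / 2) hh
      constructor
      · omega
      · intro he
        have h1 : n % 2 = 1 := by omega
        have h2 : onesN (n / 2) = m := by omega
        have := heq h2
        have hp : 0 < 2 ^ m := Nat.two_pow_pos m
        omega

theorem onesN_iff (n : Nat) (h : n < 2 ^ 27) (h0 : n.testBit 0 = false) :
    (onesN n = 26 ↔ n = 2 ^ 27 - 2) := by
  have he : n % 2 = 0 := by
    have h2 := Nat.testBit_zero n
    rw [h0] at h2
    have h3 : ¬ (n % 2 = 1) := by simpa using h2.symm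
    omega
  constructor
  · intro h26
    rcases Nat.eq_zero_or_pos n with hz | hp
    · subst hz; simp [onesN] at h26
    · rw [onesN_halve n hp, he] at h26
      have hh : n / 2 < 2 ^ 26 := by omega
      obtain ⟨_, heq⟩ := onesN_le 26 (n / 2) hh
      have := heq (by omega)
      omega
  · intro hm; subst hm
    norm_num [onesN_halve, onesN]

theorem mask_iff (n : Nat) (h : n < 2 ^ 27) (h0 : n.testBit 0 = false) :
    (n = 2 ^ 27 - 2 ↔ ∀ k, 1 ≤ k → k ≤ 26 → n.testBit k = true) := by
  constructor
  · intro hm k h1 h2; subst hm; interval_cases k <;> decide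
  · intro hb
    apply Nat.eq_of_testBit_eq
    intro i
    by_cases hi : i = 0
    · subst hi; rw [h0]; decide
    · by_cases hle : i ≤ 26
      · have h1i : 1 ≤ i := by omega
        rw [hb i h1i hle]
        interval_cases i <;> decide
      · have hpow : 2 ^ 27 ≤ 2 ^ i := Nat.pow_le_pow_right (by norm_num) (by omega)
        rw [Nat.testBit_lt_two_pow (by omega)]
        have hlt : (2 ^ 27 - 2 : Nat) < 2 ^ i := by omega
        rw [Nat.testBit_lt_two_pow hlt]

theorem count_go_single (ch : Char) (l : List Char) (fuel acc : Nat) (h : l.length ≤ fuel) :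
    PySem.Chars.count.go [ch] fuel l acc = acc + l.count ch := by
  induction l generalizing fuel acc with
  | nil => cases fuel <;> simp [PySem.Chars.count.go]
  | cons x xs ih =>
    cases fuel with
    | zero => simp at h
    | succ f =>
      rw [PySem.Chars.count.go]
      by_cases hx : x = ch
      · subst hx
        simp [List.isPrefixOf, ih _ _ (by simpa using h)]
        omega
      · have hp : ([ch].isPrefixOf (x :: xs)) = false := by
          simp [List.isPrefixOf]
          exact fun hc => absurd hc.symm hx
        rw [hp]
        simp [ih _ _ (by simpa using h), hx]

theorem count_single (l : List Char) (ch : Char) :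
    PySem.Chars.count l [ch] = l.count ch := by
  rw [PySem.Chars.count]
  simp [count_go_single ch l l.length 0 le_rfl]

theorem toDigitsCore_count (fuel : Nat) : ∀ (n : Nat) (l : List Char), n < fuel →
    (Nat.toDigitsCore 2 fuel n l).count '1' = onesN n + l.count '1' := by
  induction fuel with
  | zero => intro n l h; omega
  | succ f ih =>
    intro n l h
    rw [Nat.toDigitsCore]
    have hd : Nat.digitChar (n % 2) = if n % 2 = 1 then '1' else '0' := by
      rcases Nat.mod_two_eq_zero_or_one n with h2 | h2 <;> rw [h2] <;> rfl
    by_cases hz : n / 2 = 0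
    · simp only [hz, if_pos rfl]
      have hn2 : n < 2 := by omega
      interval_cases n <;> simp [onesN, hd] <;> omega
    · rw [if_neg hz]
      rw [ih (n / 2) _ (by omega)]
      have hn : 0 < n := by omega
      rw [onesN_halve n hn, hd]
      rcases Nat.mod_two_eq_zero_or_one n with h2 | h2 <;> simp [h2] <;> omega

-- A's final test, reduced to onesN of the Nat-side mask
theorem a_count_eq (m : Nat) :
    PySem.Str.count (PySem.Str.slice (PySem.Int.pyBin (m : Int)) (some 2) none) "1" = onesN m := by
  rw [PySem.Str.count_eq]
  have ht : (PySem.Str.slice (PySem.Int.pyBin (m : Int)) (some 2) none).toList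
      = Nat.toDigits 2 m := by
    rw [PySem.Str.toList_slice, PySem.Int.toList_pyBin]
    rw [PySem.Int.toBinChars0b]
    rw [if_neg (by omega)]
    simp only [Int.toNat_natCast, PySem.Chars.slice]
    rw [PySem.List.slice_from _ (by norm_num)]
    rfl
  rw [ht]
  have h1 : ("1" : String).toList = ['1'] := rfl
  rw [h1, count_single]
  rw [Nat.toDigits]
  exact toDigitsCore_count (m + 1) m [] (by omega)

-- membership of a single-char string
theorem isIn_single (ch : Char) (t : String) :
    PySem.Str.isIn (String.ofList [ch]) t = true ↔ ch ∈ t.toList := by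
  rw [PySem.Str.isIn_iff_infix]
  have h : (String.ofList [ch]).toList = [ch] := by simp
  rw [h]
  constructor
  · intro hi
    exact (List.singleton_sublist.mp hi.sublist)
  · intro hm
    obtain ⟨u, v, huv⟩ := List.append_of_mem hm
    exact ⟨u, v, by simp [huv]⟩

theorem lowerChar_eq_iff (i : Char) (k : Nat) (hk : k < 26) :
    PySem.Chars.lowerChar i = Char.ofNat (97 + k) ↔ (i.toNat = 97 + k ∨ i.toNat = 65 + k) := by
  have hval : (Char.ofNat (97 + k)).toNat = 97 + k := by
    rw [Char.toNat_ofNat]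
    rw [if_pos]
    constructor; omega
  have hinj : ∀ a b : Char, a = b ↔ a.toNat = b.toNat := by
    intro a b
    constructor
    · intro h; rw [h]
    · intro h
      have := congrArg Char.ofNat h
      rwa [Char.ofNat_toNat, Char.ofNat_toNat] at this
  rw [PySem.Chars.lowerChar, PySem.Chars.isupper]
  by_cases hu : 65 ≤ i.toNat ∧ i.toNat ≤ 90
  · have hup : (decide ('A' ≤ i) && decide (i ≤ 'Z')) = true := by
      simp only [Bool.and_eq_true, decide_eq_true_eq]
      exact ⟨Char.le_def.mpr hu.1, Char.le_def.mpr hu.2⟩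
    rw [if_pos hup]
    rw [hinj]
    have hv2 : (Char.ofNat (i.toNat + 32)).toNat = i.toNat + 32 := by
      rw [Char.toNat_ofNat, if_pos]
      constructor; omega
    rw [hv2, hval]
    omega
  · have hup : (decide ('A' ≤ i) && decide (i ≤ 'Z')) = false := by
      simp only [Bool.and_eq_false_iff, decide_eq_false_iff_not]
      rcases not_and_or.mp hu with hc | hc
      · left; intro hle; exact hc (Char.le_def.mp hle)
      · right; intro hle; exact hc (Char.le_def.mp hle)
    rw [if_neg (by simp [hup])]
    rw [hinj, hval]
    omega

theorem alphabet_eq :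
    "abcdefghijklmnopqrstuvwxyz".toList = (List.range 26).map (fun k => Char.ofNat (97 + k)) := by
  decide

theorem hitB_succ_iff (i : Char) (k : Nat) (hk : k < 26) :
    hitB i (k + 1) = true ↔ (i.toNat = 97 + k ∨ i.toNat = 65 + k) := by
  simp only [hitB]
  simp
  omega

theorem bit_iff_mem (l : List Char) (k : Nat) (hk : k < 26) :
    ((l.foldl stepN 0).testBit (k + 1) = true) ↔ Char.ofNat (97 + k) ∈ PySem.Chars.lower l := by
  rw [testBit_foldl]
  simp only [Nat.zero_testBit, Bool.false_or, List.any_eq_true]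
  rw [PySem.Chars.lower, List.mem_map]
  constructor
  · rintro ⟨i, hi, hh⟩
    exact ⟨i, hi, (lowerChar_eq_iff i k hk).mpr ((hitB_succ_iff i k hk).mp hh)⟩
  · rintro ⟨i, hi, hh⟩
    exact ⟨i, hi, (hitB_succ_iff i k hk).mpr ((lowerChar_eq_iff i k hk).mp hh)⟩

-- ===== VERDICT (by name: the statement is the Claim_ definition above) =====
theorem checkPangram_spec : Claim_equal_checkPangram := by
  intro s _
  unfold Spec_checkPangram checkPangram checkPangram_alt
  have hfold : s.toList.foldl chkStep 0 = ((s.toList.foldl stepN 0 : Nat) : Int) := by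
    have := foldl_cast s.toList 0
    simpa using this
  rw [hfold]
  set cN := s.toList.foldl stepN 0 with hcN
  have hiff : (PySem.Str.count (PySem.Str.slice (PySem.Int.pyBin (cN : Int)) (some 2) none) "1" = 26)
      ↔ ("abcdefghijklmnopqrstuvwxyz".toList.all
          (fun ch => PySem.Str.isIn (String.ofList [ch]) (PySem.Str.lower s)) = true) := by
    rw [a_count_eq]
    rw [onesN_iff cN (foldl_lt s.toList) (foldl_bit0 s.toList)]
    rw [mask_iff cN (foldl_lt s.toList) (foldl_bit0 s.toList)]
    rw [alphabet_eq]
    rw [List.all_eq_true]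
    constructor
    · intro hb ch hch
      rw [List.mem_map] at hch
      obtain ⟨k, hk, hch⟩ := hch
      rw [List.mem_range] at hk
      subst hch
      rw [isIn_single, PySem.Str.toList_lower]
      rw [← bit_iff_mem s.toList k hk]
      exact hb (k + 1) (by omega) (by omega)
    · intro hb k h1 h2
      have hk : k - 1 < 26 := by omega
      have hmem : Char.ofNat (97 + (k - 1)) ∈ (List.range 26).map (fun k => Char.ofNat (97 + k)) := by
        rw [List.mem_map]
        exact ⟨k - 1, List.mem_range.mpr hk, rfl⟩
      have := hb _ hmem
      rw [isIn_single, PySem.Str.toList_lower] at this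
      have hbit := (bit_iff_mem s.toList (k - 1) hk).mpr this
      have hkk : k - 1 + 1 = k := by omega
      rwa [hkk] at hbit
  by_cases hc : PySem.Str.count (PySem.Str.slice (PySem.Int.pyBin (cN : Int)) (some 2) none) "1" = 26
  · rw [if_pos hc, if_pos (hiff.mp hc)]
  · rw [if_neg hc, if_neg (fun hb => hc (hiff.mpr hb))]
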